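-- pv_equiv track=rewrite | github.com/tomnattle/chain-explosion-model | scripts/explore/ghz_geometric_v5/ghz_data_connector.py | context_product
-- ===== SOURCE A (Python) =====
-- def _char_to_spin(ch: str) -> int | None:
--     if ch in {"0", "+"}:
--         return +1
--     if ch in {"1", "-"}:
--         return -1
--     # L means loss/no-click
--     return None
--
-- def context_product(outcome: str) -> int | None:
--     vals = [_char_to_spin(c) for c in outcome]
--     if any(v is None for v in vals):
--         return None
--     out = 1
--     for v in vals:
--         out *= int(v)
--     return out
-- ===== SOURCE B (Python) =====
-- def context_product(outcome: str):
--     if set(outcome) - {"0", "+", "1", "-"}: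
--         return None
--     neg = sum(1 for c in outcome if c in {"1", "-"})
--     return -1 if neg % 2 else 1
-- ===== Notes on version B (the rewrite author's own statement) =====
-- stated objective: simpler
-- what changed: Replaces the spin-list construction plus multiply loop by a validate-then-parity computation: count the negative-spin characters and return the closed form (-1)^count, with no intermediate list.
import Mathlib
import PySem

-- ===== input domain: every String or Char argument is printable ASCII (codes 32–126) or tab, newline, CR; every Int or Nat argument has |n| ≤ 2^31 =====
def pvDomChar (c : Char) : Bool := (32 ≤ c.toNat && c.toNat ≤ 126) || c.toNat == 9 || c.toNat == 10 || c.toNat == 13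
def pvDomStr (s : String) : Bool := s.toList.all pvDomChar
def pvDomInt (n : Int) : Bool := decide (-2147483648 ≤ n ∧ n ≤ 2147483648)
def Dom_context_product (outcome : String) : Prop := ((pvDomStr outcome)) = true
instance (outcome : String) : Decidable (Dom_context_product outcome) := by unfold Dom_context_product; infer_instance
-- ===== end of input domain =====

-- B: validate-then-parity closed form instead of A's spin-list + multiply loop (objective: simpler).

-- ===== PORT A =====
def charToSpin (ch : Char) : Option Int :=
  if ch = '0' ∨ ch = '+' then some 1
  else if ch = '1' ∨ ch = '-' then some (-1)
  else none

def context_product (outcome : String) : Option Int :=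
  let vals := outcome.toList.map charToSpin
  if vals.any (fun v => v.isNone) then none
  else some (vals.foldl (fun out v => out * v.getD 0) 1)

-- ===== PORT B =====
def context_product_alt (outcome : String) : Option Int :=
  if (PySem.Set.ofList outcome.toList).filter (fun c => c ∉ ['0', '+', '1', '-']) ≠ [] then
    none
  else
    let neg := (outcome.toList.filter (fun c => c == '1' || c == '-')).length
    if neg % 2 = 1 then some (-1) else some 1

-- ===== PRECONDITION & SPEC =====
def Spec_context_product (outcome : String) (out : Option Int) : Prop := out = context_product_alt outcome
instance (outcome : String) (out : Option Int) : Decidable (Spec_context_product outcome out) := by unfold Spec_context_product; infer_instance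

-- ===== CLAIM (what is proved, stated in full; the proofs are below) =====
def Claim_equal_context_product : Prop := ∀ (outcome : String), Dom_context_product outcome → Spec_context_product outcome (context_product outcome)

-- ===== LEMMAS AND PROOFS =====

theorem spin_none_iff (c : Char) :
    (charToSpin c).isNone = false ↔ (c = '0' ∨ c = '+' ∨ c = '1' ∨ c = '-') := by
  unfold charToSpin
  split_ifs with h1 h2 <;> simp <;> tauto

-- validity of the two checks agrees
theorem valid_iff (l : List Char) :
    ((l.map charToSpin).any (fun v => v.isNone) = false) ↔
      ((PySem.Set.ofList l).filter (fun c => c ∉ ['0', '+', '1', '-']) = []) := by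
  rw [List.any_eq_false, List.filter_eq_nil_iff]
  constructor
  · intro h c hc
    have hc' : c ∈ l := (PySem.Set.mem_ofList l c).mp hc
    have hd := (spin_none_iff c).mp (Bool.eq_false_iff.mpr (h _ (List.mem_map_of_mem hc')))
    simp
    tauto
  · intro h v hv
    rcases List.mem_map.mp hv with ⟨c, hc, rfl⟩
    have hmem : c ∈ PySem.Set.ofList l := (PySem.Set.mem_ofList l c).mpr hc
    have hd := h c hmem
    simp at hd
    simp [(spin_none_iff c).mpr (by tauto)]

-- on valid lists the product is (-1)^(count of negatives)
theorem fold_parity (l : List Char)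
    (hval : ∀ c ∈ l, (charToSpin c).isNone = false) (a : Int) :
    (l.map charToSpin).foldl (fun out v => out * v.getD 0) a =
      a * (if (l.filter (fun c => c == '1' || c == '-')).length % 2 = 1 then -1 else 1) := by
  induction l generalizing a with
  | nil => simp
  | cons c t ih =>
    have hc := (spin_none_iff c).mp (hval c (List.mem_cons_self ..))
    have ht : ∀ x ∈ t, (charToSpin x).isNone = false :=
      fun x hx => hval x (List.mem_cons_of_mem c hx)
    by_cases hneg : c = '1' ∨ c = '-'
    · have hspin : charToSpin c = some (-1) := by
        rcases hneg with h | h <;> simp [charToSpin, h]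
      have hp : (c == '1' || c == '-') = true := by
        rcases hneg with h | h <;> simp [h]
      have hfc : List.filter (fun c => c == '1' || c == '-') (c :: t) =
          c :: List.filter (fun c => c == '1' || c == '-') t := by
        simp [hp]
      rw [List.map_cons, List.foldl_cons, hspin, ih ht, hfc]
      simp only [Option.getD_some, List.length_cons]
      rcases Nat.mod_two_eq_zero_or_one
          (List.filter (fun c => c == '1' || c == '-') t).length with h | h
      · rw [if_neg (by omega), if_pos (by omega)]; ring
      · rw [if_pos h, if_neg (by omega)]; ring
    · have hspin : charToSpin c = some 1 := by
        have h0 : c = '0' ∨ c = '+' := by tauto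
        rcases h0 with h | h <;> simp [charToSpin, h]
      have hp : (c == '1' || c == '-') = false := by
        simp
        exact ⟨fun h => hneg (Or.inl h), fun h => hneg (Or.inr h)⟩
      have hfc : List.filter (fun c => c == '1' || c == '-') (c :: t) =
          List.filter (fun c => c == '1' || c == '-') t := by
        simp [hp]
      rw [List.map_cons, List.foldl_cons, hspin, ih ht, hfc]
      simp only [Option.getD_some, mul_one]

-- ===== VERDICT (by name: the statement is the Claim_ definition above) =====
theorem context_product_spec : Claim_equal_context_product := by
  intro outcome _
  unfold Spec_context_product context_product context_product_alt
  by_cases hv : (outcome.toList.map charToSpin).any (fun v => v.isNone) = false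
  · have hB : ¬ (PySem.Set.ofList outcome.toList).filter
        (fun c => c ∉ ['0', '+', '1', '-']) ≠ [] :=
      not_not_intro ((valid_iff outcome.toList).mp hv)
    rw [if_neg (by simp [hv]), if_neg hB]
    have hall : ∀ c ∈ outcome.toList, (charToSpin c).isNone = false := fun c hc =>
      Bool.eq_false_iff.mpr (List.any_eq_false.mp hv _ (List.mem_map_of_mem hc))
    rw [fold_parity outcome.toList hall 1]
    split_ifs <;> simp_all
  · have hv' : (outcome.toList.map charToSpin).any (fun v => v.isNone) = true := by
      simpa using hv
    have hB : (PySem.Set.ofList outcome.toList).filter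
        (fun c => c ∉ ['0', '+', '1', '-']) ≠ [] :=
      fun h => hv ((valid_iff outcome.toList).mpr h)
    rw [if_pos (by simp [hv']), if_pos hB]
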